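-- pv_equiv track=rewrite | github.com/gustavolac/pbstop | pbstop.py | parse_hms_to_seconds
-- ===== SOURCE A (Python) =====
-- def parse_hms_to_seconds(hms: str) -> int:
--     """Parse 'HH:MM:SS' (HH can be >24). Also accepts 'MM:SS' or 'SS'."""
--     if not hms:
--         return 0
--     parts = [p for p in hms.strip().split(":") if p != ""]
--     try:
--         if len(parts) == 3:
--             h, m, s = (int(parts[0]), int(parts[1]), int(parts[2]))
--             return h * 3600 + m * 60 + s
--         elif len(parts) == 2:
--             m, s = (int(parts[0]), int(parts[1]))
--             return m * 60 + s
--         elif len(parts) == 1: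
--             return int(parts[0])
--     except ValueError:
--         pass
--     return 0
-- ===== SOURCE B (Python) =====
-- def parse_hms_to_seconds(hms: str) -> int:
--     """Parse 'HH:MM:SS' (HH can be >24). Also accepts 'MM:SS' or 'SS'."""
--     if not hms:
--         return 0
--     parts = [p for p in hms.strip().split(":") if p != ""]
--     if len(parts) not in (1, 2, 3):
--         return 0
--     total = 0
--     try:
--         for p in parts:
--             total = total * 60 + int(p)
--     except ValueError:
--         return 0
--     return total
-- ===== Notes on version B (the rewrite author's own statement) =====
-- stated objective: simpler
-- what changed: Replaces the three length-specific unpack-and-multiply branches by a single length-in-{1,2,3} guard plus one Horner-style fold total = total*60 + int(p) over the parts.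
import Mathlib
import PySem

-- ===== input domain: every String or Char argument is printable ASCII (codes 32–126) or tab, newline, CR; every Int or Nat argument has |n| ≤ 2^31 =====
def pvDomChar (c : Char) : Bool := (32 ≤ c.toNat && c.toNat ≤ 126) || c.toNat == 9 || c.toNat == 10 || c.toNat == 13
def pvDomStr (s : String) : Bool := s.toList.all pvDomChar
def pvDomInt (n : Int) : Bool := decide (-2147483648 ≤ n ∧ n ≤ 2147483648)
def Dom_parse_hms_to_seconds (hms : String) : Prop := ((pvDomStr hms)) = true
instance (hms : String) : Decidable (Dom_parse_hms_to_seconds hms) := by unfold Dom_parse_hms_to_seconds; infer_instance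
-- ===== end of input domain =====

-- B replaces A's three length-specific branches by one Horner-style fold total = total*60 + int(p); simpler decomposition, same values.
-- ===== PORT A =====
-- parts = [p for p in hms.strip().split(":") if p != ""]  (":" is non-empty, so split? never returns none; getD [] is unreachable)
def pvParts (hms : String) : List String :=
  ((PySem.Str.split? (PySem.Str.strip hms) ":").getD []).filter (fun p => p ≠ "")

def parse_hms_to_seconds (hms : String) : Int :=
  if hms = "" then 0
  else
    let parts := pvParts hms
    if parts.length = 3 then
      match PySem.Int.ofStr? (parts.getD 0 ""), PySem.Int.ofStr? (parts.getD 1 ""),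
            PySem.Int.ofStr? (parts.getD 2 "") with
      | some h, some m, some s => h * 3600 + m * 60 + s
      | _, _, _ => 0   -- ValueError -> fall through to return 0
    else if parts.length = 2 then
      match PySem.Int.ofStr? (parts.getD 0 ""), PySem.Int.ofStr? (parts.getD 1 "") with
      | some m, some s => m * 60 + s
      | _, _ => 0
    else if parts.length = 1 then
      match PySem.Int.ofStr? (parts.getD 0 "") with
      | some v => v
      | none => 0
    else 0

-- ===== PORT B =====
-- the try-guarded loop 'total = total*60 + int(p)': none = ValueError
def pvHorner : Int → List String → Option Int
  | acc, [] => some acc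
  | acc, p :: rest =>
    match PySem.Int.ofStr? p with
    | some v => pvHorner (acc * 60 + v) rest
    | none => none

def parse_hms_to_seconds_alt (hms : String) : Int :=
  if hms = "" then 0
  else
    let parts := pvParts hms
    if parts.length = 1 ∨ parts.length = 2 ∨ parts.length = 3 then
      match pvHorner 0 parts with
      | some t => t
      | none => 0
    else 0

-- ===== PRECONDITION & SPEC =====
def Spec_parse_hms_to_seconds (hms : String) (out : Int) : Prop := out = parse_hms_to_seconds_alt hms
instance (hms : String) (out : Int) : Decidable (Spec_parse_hms_to_seconds hms out) := by unfold Spec_parse_hms_to_seconds; infer_instance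

-- ===== CLAIM (what is proved, stated in full; the proofs are below) =====
def Claim_equal_parse_hms_to_seconds : Prop := ∀ (hms : String), Dom_parse_hms_to_seconds hms → Spec_parse_hms_to_seconds hms (parse_hms_to_seconds hms)

-- ===== LEMMAS AND PROOFS =====
lemma core_eq (parts : List String) :
    (if parts.length = 3 then
      match PySem.Int.ofStr? (parts.getD 0 ""), PySem.Int.ofStr? (parts.getD 1 ""),
            PySem.Int.ofStr? (parts.getD 2 "") with
      | some h, some m, some s => h * 3600 + m * 60 + s
      | _, _, _ => (0:Int)
    else if parts.length = 2 then
      match PySem.Int.ofStr? (parts.getD 0 ""), PySem.Int.ofStr? (parts.getD 1 "") with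
      | some m, some s => m * 60 + s
      | _, _ => 0
    else if parts.length = 1 then
      match PySem.Int.ofStr? (parts.getD 0 "") with
      | some v => v
      | none => 0
    else 0) =
    (if parts.length = 1 ∨ parts.length = 2 ∨ parts.length = 3 then
      match pvHorner 0 parts with
      | some t => t
      | none => 0
    else (0:Int)) := by
  match parts with
  | [] => simp
  | [a] =>
    cases ha : PySem.Int.ofStr? a <;> simp [pvHorner, ha]
  | [a, b] =>
    cases ha : PySem.Int.ofStr? a <;> cases hb : PySem.Int.ofStr? b <;>
      simp [pvHorner, ha, hb]
  | [a, b, c] =>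
    cases ha : PySem.Int.ofStr? a <;> cases hb : PySem.Int.ofStr? b <;>
      cases hc : PySem.Int.ofStr? c <;> simp [pvHorner, ha, hb, hc]
    ring
  | a :: b :: c :: d :: rest => simp

-- ===== VERDICT (by name: the statement is the Claim_ definition above) =====
theorem parse_hms_to_seconds_spec : Claim_equal_parse_hms_to_seconds := by
  intro hms _
  show parse_hms_to_seconds hms = parse_hms_to_seconds_alt hms
  unfold parse_hms_to_seconds parse_hms_to_seconds_alt
  by_cases h : hms = ""
  · rw [if_pos h, if_pos h]
  · rw [if_neg h, if_neg h]
    exact core_eq (pvParts hms)
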